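-- pv_equiv track=rewrite | github.com/miliar/Code_Jam_Webscraper | solutions_python/Problem_155/2837.py | count
-- ===== SOURCE A (Python) =====
-- def count(dist):
--     dist = sorted(dist)
--     n = 0
--     extras = 0
--     for p in dist:
--         if p > n:
--             extras += p - n
--             n += p - n
--         n += 1
--     return extras
-- ===== SOURCE B (Python) =====
-- def count(dist):
--     return max([0] + [p - i for i, p in enumerate(sorted(dist))])
-- ===== Notes on version B (the rewrite author's own statement) =====
-- stated objective: simpler
-- what changed: Replaces the running-counter loop with a jump branch by a closed-form max-reduction: extras = max(0, max_i(sorted[i] - i)).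
import Mathlib
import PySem

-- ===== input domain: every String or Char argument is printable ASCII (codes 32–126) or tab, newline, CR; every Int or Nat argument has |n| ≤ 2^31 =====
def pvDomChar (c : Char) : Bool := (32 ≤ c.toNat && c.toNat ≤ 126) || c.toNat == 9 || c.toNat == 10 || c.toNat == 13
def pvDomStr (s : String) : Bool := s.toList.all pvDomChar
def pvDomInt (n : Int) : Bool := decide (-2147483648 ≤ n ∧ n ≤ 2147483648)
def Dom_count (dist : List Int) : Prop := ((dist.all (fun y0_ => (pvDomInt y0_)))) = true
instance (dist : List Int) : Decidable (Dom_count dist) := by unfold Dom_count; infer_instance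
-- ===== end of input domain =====

-- B replaces A's running-counter loop (with its conditional jump) by the closed form
-- max(0, max_i(sorted[i] - i)); objective: simpler.

-- ===== PORT A =====
-- the loop body: 'if p > n: extras += p - n; n += p - n' then 'n += 1', on state (n, extras)
def countStep (st : Int × Int) (p : Int) : Int × Int :=
  let st' := if p > st.1 then (st.1 + (p - st.1), st.2 + (p - st.1)) else st
  (st'.1 + 1, st'.2)

def count (dist : List Int) : Int :=
  ((PySem.List.sorted dist (fun x => x) false).foldl countStep (0, 0)).2

-- ===== PORT B =====
-- max([0] + [p - i for i, p in enumerate(sorted(dist))]); max of the 0-headed list is the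
-- running-max fold seeded with 0 (PySem.List.max?_id_cons states this equality as rfl).
def count_alt (dist : List Int) : Int :=
  ((PySem.List.enumerate (PySem.List.sorted dist (fun x => x) false) 0).map
      (fun ip => ip.2 - ip.1)).foldl max 0

-- ===== PRECONDITION & SPEC =====
def Spec_count (dist : List Int) (out : Int) : Prop := out = count_alt dist
instance (dist : List Int) (out : Int) : Decidable (Spec_count dist out) := by unfold Spec_count; infer_instance

-- ===== CLAIM (what is proved, stated in full; the proofs are below) =====
def Claim_equal_count : Prop := ∀ (dist : List Int), Dom_count dist → Spec_count dist (count dist)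

-- ===== LEMMAS AND PROOFS =====

-- the 'n'-component of A's loop, in isolation: n := max n p + 1 at each step
def nLoop (n : Int) (xs : List Int) : Int :=
  xs.foldl (fun n p => max n p + 1) n

-- B's fold, with the enumeration starting at k and accumulator a
def maxLoop (k a : Int) (xs : List Int) : Int :=
  ((PySem.List.enumerate xs k).map (fun ip => ip.2 - ip.1)).foldl max a

-- A's fold computes (nLoop n xs, e + nLoop n xs - n - len xs): extras grows exactly as n
-- grows beyond the one-per-element increment
theorem countStep_foldl (xs : List Int) : ∀ (n e : Int),
    xs.foldl countStep (n, e) = (nLoop n xs, e + nLoop n xs - n - xs.length) := by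
  induction xs with
  | nil => intro n e; simp [nLoop]
  | cons p xs ih =>
    intro n e
    have hstep : countStep (n, e) p = (max n p + 1, e + (max n p - n)) := by
      simp only [countStep]
      by_cases h : p > n
      · simp [h, max_eq_right (le_of_lt h)]
      · simp [h, max_eq_left (not_lt.mp h)]
    have hn : nLoop n (p :: xs) = nLoop (max n p + 1) xs := by simp [nLoop]
    simp only [List.foldl_cons, hstep, ih, hn, List.length_cons, Prod.mk.injEq]
    refine ⟨trivial, ?_⟩
    push_cast; ring

-- the running-counter n equals len + k + the running max of (p - i) over enumerate from k
theorem nLoop_eq_maxLoop (xs : List Int) : ∀ (k n : Int),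
    nLoop n xs = xs.length + k + maxLoop k (n - k) xs := by
  induction xs with
  | nil => intro k n; simp [nLoop, maxLoop, PySem.List.enumerate]
  | cons p xs ih =>
    intro k n
    have h1 : nLoop n (p :: xs) = nLoop (max n p + 1) xs := by simp [nLoop]
    have h2 : maxLoop k (n - k) (p :: xs) = maxLoop (k + 1) (max (n - k) (p - k)) xs := by
      simp [maxLoop, PySem.List.enumerate_cons]
    have h3 : max n p + 1 - (k + 1) = max (n - k) (p - k) := by
      rcases le_total n p with h | h
      · rw [max_eq_right h, max_eq_right (by omega)]; ring
      · rw [max_eq_left h, max_eq_left (by omega)]; ring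
    rw [h1, ih (k + 1) (max n p + 1), h3, h2, List.length_cons]
    push_cast; ring

-- ===== VERDICT (by name: the statement is the Claim_ definition above) =====
theorem count_spec : Claim_equal_count := by
  intro dist _
  unfold Spec_count count count_alt
  set s := PySem.List.sorted dist (fun x => x) false with hs
  rw [countStep_foldl]
  have := nLoop_eq_maxLoop s 0 0
  simp only [sub_zero] at this
  rw [this]
  simp [maxLoop]
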